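-- pv_equiv track=rewrite | github.com/nresare/aoc | aoc2021/day23/day23.py | gen_valid_moves
-- ===== SOURCE A (Python) =====
-- VALID_LOCATIONS = (
--     (1, 1), (1, 2), (1, 3), (1, 4), (1, 5),
--     (1, 6), (1, 7), (1, 8), (1, 9), (1, 10), (1, 11),
--     (2, 3), (2, 5), (2, 7), (2, 9),
--     (3, 3), (3, 5), (3, 7), (3, 9),
-- )
--
-- CANT_STOP = (
--     (1, 3), (1, 5), (1, 7), (1, 9),
-- )
--
-- Pair = tuple[int, int]
--
-- Piece = tuple[str, Pair]
--
-- def gen_valid_moves(state: tuple[Piece, ...]) -> tuple[Piece, Pair]: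
--     taken = {s[1] for s in state}
--     for s in state:
--         if s[1] in CANT_STOP:
--             x, y = s[1]
--             for candidate in ((x - 1, y), (x + 1, y), (x, y - 1), (x, y + 1)):
--                 if candidate in VALID_LOCATIONS and candidate not in taken:
--                     yield s, candidate
--             return
--
--     for s in state:
--         x, y = s[1]
--         for candidate in ((x - 1, y), (x + 1, y), (x, y - 1), (x, y + 1)):
--             if candidate in VALID_LOCATIONS and candidate not in taken:
--                 yield s, candidate
-- ===== SOURCE B (Python) =====
-- VALID_LOCATIONS = (
--     (1, 1), (1, 2), (1, 3), (1, 4), (1, 5),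
--     (1, 6), (1, 7), (1, 8), (1, 9), (1, 10), (1, 11),
--     (2, 3), (2, 5), (2, 7), (2, 9),
--     (3, 3), (3, 5), (3, 7), (3, 9),
-- )
--
-- CANT_STOP = (
--     (1, 3), (1, 5), (1, 7), (1, 9),
-- )
--
-- # Precomputed adjacency table: NEIGHBORS[p] lists the valid squares one step
-- # from p, in the candidate order up/down/left/right.
-- DELTAS = ((-1, 0), (1, 0), (0, -1), (0, 1))
--
-- NEIGHBORS = {}
-- for _p, _v in [((x - dx, y - dy), (x, y)) for dx, dy in DELTAS for x, y in VALID_LOCATIONS]: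
--     NEIGHBORS[_p] = NEIGHBORS.get(_p, ()) + (_v,)
--
--
-- def gen_valid_moves(state):
--     taken = {s[1] for s in state}
--     acc = []
--     for s in state:
--         ms = [(s, c) for c in NEIGHBORS.get(s[1], ()) if c not in taken]
--         if s[1] in CANT_STOP:
--             yield from ms
--             return
--         acc.extend(ms)
--     yield from acc
-- ===== Notes on version B (the rewrite author's own statement) =====
-- stated objective: alternative
-- what changed: B precomputes an adjacency dict NEIGHBORS (valid neighbours of each square in A's candidate order), replacing A's per-candidate enumeration with VALID_LOCATIONS membership tests, and replaces A's two staged scans (special-piece scan with early return, then a full second scan) by a single pass with an accumulator and early return.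
import Mathlib
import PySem

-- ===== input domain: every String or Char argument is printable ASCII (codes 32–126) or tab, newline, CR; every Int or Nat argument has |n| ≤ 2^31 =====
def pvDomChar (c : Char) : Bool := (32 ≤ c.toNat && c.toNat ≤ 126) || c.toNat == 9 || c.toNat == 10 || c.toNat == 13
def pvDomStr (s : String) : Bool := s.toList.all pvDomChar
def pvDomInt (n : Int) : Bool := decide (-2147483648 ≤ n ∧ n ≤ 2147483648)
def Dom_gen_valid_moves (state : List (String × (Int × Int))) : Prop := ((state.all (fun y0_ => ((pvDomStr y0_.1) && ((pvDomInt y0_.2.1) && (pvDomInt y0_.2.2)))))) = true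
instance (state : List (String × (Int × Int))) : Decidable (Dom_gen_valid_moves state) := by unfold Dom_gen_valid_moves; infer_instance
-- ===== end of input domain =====

-- Both Pythons are generators; the equivalence is about the yielded sequence, compared as a list.
-- B replaces A's per-candidate VALID_LOCATIONS membership test by a precomputed adjacency table
-- and A's two staged scans by one pass with an accumulator and early return.

-- ===== PORT A =====
def pvVALID : List (Int × Int) :=
  [(1, 1), (1, 2), (1, 3), (1, 4), (1, 5),
   (1, 6), (1, 7), (1, 8), (1, 9), (1, 10), (1, 11),
   (2, 3), (2, 5), (2, 7), (2, 9),
   (3, 3), (3, 5), (3, 7), (3, 9)]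

def pvCANT : List (Int × Int) := [(1, 3), (1, 5), (1, 7), (1, 9)]

-- A's first loop: on the first piece sitting on a CANT_STOP square, yield its moves and return.
def gvmA_go (taken : List (Int × Int)) :
    List (String × (Int × Int)) → Option (List ((String × (Int × Int)) × (Int × Int)))
  | [] => none
  | s :: rest =>
      if pvCANT.contains s.2 then
        some ((([(s.2.1 - 1, s.2.2), (s.2.1 + 1, s.2.2),
                 (s.2.1, s.2.2 - 1), (s.2.1, s.2.2 + 1)].filter
                  (fun c => pvVALID.contains c && !(taken.contains c))).map (fun c => (s, c))))
      else gvmA_go taken rest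

def gen_valid_moves (state : List (String × (Int × Int))) :
    List ((String × (Int × Int)) × (Int × Int)) :=
  let taken := PySem.Set.ofList (state.map (·.2))
  match gvmA_go taken state with
  | some r => r
  | none =>
      state.flatMap (fun s =>
        (([(s.2.1 - 1, s.2.2), (s.2.1 + 1, s.2.2),
           (s.2.1, s.2.2 - 1), (s.2.1, s.2.2 + 1)].filter
            (fun c => pvVALID.contains c && !(taken.contains c))).map (fun c => (s, c))))

-- ===== PORT B =====
def pvDELTAS : List (Int × Int) := [(-1, 0), (1, 0), (0, -1), (0, 1)]

-- the comprehension [((x - dx, y - dy), (x, y)) for dx, dy in DELTAS for x, y in VALID_LOCATIONS]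
def pvPairs : List ((Int × Int) × (Int × Int)) :=
  pvDELTAS.flatMap (fun d => pvVALID.map (fun v => ((v.1 - d.1, v.2 - d.2), v)))

-- NEIGHBORS[p] = NEIGHBORS.get(p, ()) + (v,)  over that comprehension
def pvNEIGHBORS : PySem.Dict (Int × Int) (List (Int × Int)) :=
  pvPairs.foldl (fun t q => t.modify q.1 [] (· ++ [q.2])) PySem.Dict.empty

def gvmB_go (taken : List (Int × Int)) :
    List (String × (Int × Int)) → List ((String × (Int × Int)) × (Int × Int)) →
      List ((String × (Int × Int)) × (Int × Int))
  | [], acc => acc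
  | s :: rest, acc =>
      let ms := ((pvNEIGHBORS.getD s.2 []).filter (fun c => !(taken.contains c))).map
        (fun c => (s, c))
      if pvCANT.contains s.2 then ms else gvmB_go taken rest (acc ++ ms)

def gen_valid_moves_alt (state : List (String × (Int × Int))) :
    List ((String × (Int × Int)) × (Int × Int)) :=
  let taken := PySem.Set.ofList (state.map (·.2))
  gvmB_go taken state []

-- ===== PRECONDITION & SPEC =====
def Spec_gen_valid_moves (state : List (String × (Int × Int))) (out : List ((String × (Int × Int)) × (Int × Int))) : Prop := out = gen_valid_moves_alt state
instance (state : List (String × (Int × Int))) (out : List ((String × (Int × Int)) × (Int × Int))) : Decidable (Spec_gen_valid_moves state out) := by unfold Spec_gen_valid_moves; infer_instance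

-- ===== CLAIM (what is proved, stated in full; the proofs are below) =====
def Claim_equal_gen_valid_moves : Prop := ∀ (state : List (String × (Int × Int))), Dom_gen_valid_moves state → Spec_gen_valid_moves state (gen_valid_moves state)

-- ===== LEMMAS AND PROOFS =====

-- filtering a Nodup list for the element shifted-equal to t keeps exactly t+δ (if present)
theorem filter_shift (a b : Int) (t : Int × Int) :
    ∀ (l : List (Int × Int)), l.Nodup →
      l.filter (fun v => (v.1 - a, v.2 - b) == t) =
        if l.contains (t.1 + a, t.2 + b) then [(t.1 + a, t.2 + b)] else [] := by
  intro l hnd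
  induction l with
  | nil => simp
  | cons v rest ih =>
    have hvr : v ∉ rest := (List.nodup_cons.mp hnd).1
    have hr := ih ((List.nodup_cons.mp hnd).2)
    by_cases hv : v = (t.1 + a, t.2 + b)
    · subst hv
      have hcond : ((t.1 + a - a, t.2 + b - b) == t) = true := by
        simp
      have hrest : rest.filter (fun v => (v.1 - a, v.2 - b) == t) = [] := by
        apply List.filter_eq_nil_iff.mpr
        intro u hu
        simp only [beq_iff_eq, Prod.ext_iff]
        rintro ⟨h1, h2⟩
        exact hvr (by
          have : u = (t.1 + a, t.2 + b) := by
            obtain ⟨u1, u2⟩ := u; simp at h1 h2 ⊢; omega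
          rwa [this] at hu)
      simp [hrest]
    · have hcond : ((v.1 - a, v.2 - b) == t) = false := by
        simp only [beq_eq_false_iff_ne, ne_eq, Prod.ext_iff]
        rintro ⟨h1, h2⟩
        exact hv (by obtain ⟨v1, v2⟩ := v; simp at h1 h2 ⊢; omega)
      have hne : ((t.1 + a, t.2 + b) == v) = false := by
        simp only [beq_eq_false_iff_ne, ne_eq]
        intro h; exact hv h.symm
      simp [hcond, hr, show ¬((t.1 + a, t.2 + b) = v) from fun h => hv h.symm]

-- the adjacency table looked up at any point p equals A's filtered candidate list
theorem neighbors_getD (p : Int × Int) :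
    pvNEIGHBORS.getD p [] =
      [(p.1 - 1, p.2), (p.1 + 1, p.2), (p.1, p.2 - 1), (p.1, p.2 + 1)].filter
        (fun c => pvVALID.contains c) := by
  have hnd : pvVALID.Nodup := by decide
  unfold pvNEIGHBORS
  rw [PySem.Dict.getD_foldl_modify_append]
  simp only [PySem.Dict.getD_empty, List.nil_append]
  unfold pvPairs pvDELTAS
  simp only [List.flatMap_cons, List.flatMap_nil, List.append_nil, List.filter_append,
    List.filter_map, Function.comp_def, List.map_append, List.map_map]
  rw [filter_shift (-1) 0 p pvVALID hnd, filter_shift 1 0 p pvVALID hnd,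
    filter_shift 0 (-1) p pvVALID hnd, filter_shift 0 1 p pvVALID hnd]
  cases h1 : pvVALID.contains (p.1 + -1, p.2 + 0) <;>
    cases h2 : pvVALID.contains (p.1 + 1, p.2 + 0) <;>
      cases h3 : pvVALID.contains (p.1 + 0, p.2 + -1) <;>
        cases h4 : pvVALID.contains (p.1 + 0, p.2 + 1) <;>
          simp_all [show ∀ q : Int, q + -1 = q - 1 from fun q => by ring,
            show ∀ q : Int, q + 0 = q from fun q => by ring]

-- B's per-piece move list equals A's per-piece move list
theorem moves_eq (taken : List (Int × Int)) (s : String × (Int × Int)) :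
    ((pvNEIGHBORS.getD s.2 []).filter (fun c => !(taken.contains c))).map (fun c => (s, c)) =
      (([(s.2.1 - 1, s.2.2), (s.2.1 + 1, s.2.2),
         (s.2.1, s.2.2 - 1), (s.2.1, s.2.2 + 1)].filter
          (fun c => pvVALID.contains c && !(taken.contains c))).map (fun c => (s, c))) := by
  rw [neighbors_getD s.2, List.filter_filter]
  congr 1
  apply List.filter_congr
  intro c _
  exact Bool.and_comm _ _

-- A's first loop scans for the first piece on a CANT_STOP square
theorem gvmA_go_eq_find (taken : List (Int × Int)) :
    ∀ (l : List (String × (Int × Int))),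
      gvmA_go taken l = (l.find? (fun s => pvCANT.contains s.2)).map (fun s =>
        ((pvNEIGHBORS.getD s.2 []).filter (fun c => !(taken.contains c))).map (fun c => (s, c))) := by
  intro l
  induction l with
  | nil => rfl
  | cons s rest ih =>
    simp only [gvmA_go, List.find?]
    cases h : pvCANT.contains s.2 with
    | false => simp only [Bool.false_eq_true, if_false]; exact ih
    | true =>
      simp only [if_true, Option.map_some]
      exact congrArg some (moves_eq taken s).symm

-- B's single pass: early return on the first special piece, else the accumulated moves
theorem gvmB_go_eq (taken : List (Int × Int)) :
    ∀ (l : List (String × (Int × Int))) (acc : List ((String × (Int × Int)) × (Int × Int))),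
      gvmB_go taken l acc =
        match l.find? (fun s => pvCANT.contains s.2) with
        | some sp => ((pvNEIGHBORS.getD sp.2 []).filter (fun c => !(taken.contains c))).map
            (fun c => (sp, c))
        | none => acc ++ l.flatMap (fun s =>
            ((pvNEIGHBORS.getD s.2 []).filter (fun c => !(taken.contains c))).map
              (fun c => (s, c))) := by
  intro l
  induction l with
  | nil => intro acc; simp [gvmB_go]
  | cons s rest ih =>
    intro acc
    simp only [gvmB_go, List.find?]
    cases h : pvCANT.contains s.2 with
    | true => simp
    | false =>
      simp only [Bool.false_eq_true, if_false, ih]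
      cases hf : rest.find? (fun s => pvCANT.contains s.2) <;>
        simp [List.flatMap_cons, List.append_assoc]

-- ===== VERDICT (by name: the statement is the Claim_ definition above) =====
theorem gen_valid_moves_spec : Claim_equal_gen_valid_moves := by
  intro state _
  unfold Spec_gen_valid_moves gen_valid_moves gen_valid_moves_alt
  dsimp only
  rw [gvmB_go_eq, gvmA_go_eq_find]
  cases h : state.find? (fun s => pvCANT.contains s.2) with
  | some sp => simp only [Option.map_some]
  | none =>
    simp only [Option.map_none, List.nil_append]
    exact congrArg (fun f => List.flatMap f state) (funext fun s => (moves_eq _ s).symm)
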